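-- pv_equiv track=rewrite | github.com/FrancoGarayBenitez/global_mutantes | mutantes.py | obtenerDiagonales
-- ===== SOURCE A (Python) =====
-- def obtenerDiagonales(matriz):
--     diagonales = []
--     aux = ""
--     dimMatriz = len(matriz)
--
--     # Recorrido de la matriz por sus diagonales:
--     # Inicio en esquina inferior izquierda, retrocediendo hasta la
--     # esquina superior izquierda y asciendiendo hasta
--     # finalizar en la esquina superior derecha.
--
--     # Bucle para obtener las diagonales inferiores a la central inclusive
--     for i in range(dimMatriz-1, 0-1, -1):
--         row = i
--         col = 0
--
--         while(row<dimMatriz and col<dimMatriz):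
--             aux += matriz[row][col]
--             row = row + 1
--             col = col + 1
--
--         # Agregar diagonal al array
--         diagonales.append(aux)
--         # Reinicio de variable aux
--         aux = ""
--
--
--     # Bucle para obtener las diagonales superiores a la central sin incluir
--     for i in range(dimMatriz):
--         row = 0
--         col = i+1
--
--         while (row<dimMatriz and col<dimMatriz):
--             aux += matriz[row][col]
--             row = row + 1
--             col = col + 1
--
--         # Agregar diagonal
--         diagonales.append(aux)
--         # Reinicio de variable aux
--         aux = ""
--
--     return diagonales
-- ===== SOURCE B (Python) =====
-- def obtenerDiagonales(matriz):
--     n = len(matriz)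
--     diag = {}
--     # single row-major pass: cell (r, c) belongs to diagonal r - c
--     for r in range(n):
--         for c in range(n):
--             diag[r - c] = diag.get(r - c, "") + matriz[r][c]
--     # diagonals from bottom-left (d = n-1) up to top-right; d = -n is the empty one
--     return [diag.get(d, "") for d in range(n - 1, -n - 1, -1)]
-- ===== Notes on version B (the rewrite author's own statement) =====
-- stated objective: alternative
-- what changed: Replaces A's two diagonal-walking phases (a while-loop walk per diagonal start) by a single row-major pass grouping each cell into a dict keyed by the diagonal index r-c, then reading the 2n diagonals off one range of keys.
import Mathlib
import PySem

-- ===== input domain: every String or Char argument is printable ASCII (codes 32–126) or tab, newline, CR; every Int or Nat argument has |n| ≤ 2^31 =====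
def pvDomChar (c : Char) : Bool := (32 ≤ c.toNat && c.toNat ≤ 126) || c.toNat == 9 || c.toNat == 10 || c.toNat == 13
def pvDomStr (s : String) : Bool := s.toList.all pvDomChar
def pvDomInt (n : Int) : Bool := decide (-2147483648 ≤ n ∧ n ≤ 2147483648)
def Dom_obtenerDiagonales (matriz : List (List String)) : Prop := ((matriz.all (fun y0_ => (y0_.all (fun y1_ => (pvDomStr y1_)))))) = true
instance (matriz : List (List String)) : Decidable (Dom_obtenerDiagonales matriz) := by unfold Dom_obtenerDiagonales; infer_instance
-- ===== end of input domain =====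

-- B replaces A's two diagonal-walking phases by one row-major pass grouping cells in a dict keyed by r-c (alternative decomposition, same cost).

-- ===== PORT A =====
-- matriz[row][col]: both indices are nonnegative and in range on every admitted input (Pre_), so pyGetD is exact here
def pvCell (matriz : List (List String)) (r c : Int) : String :=
  PySem.List.pyGetD (PySem.List.pyGetD matriz r []) c ""

-- the inner 'while(row<dimMatriz and col<dimMatriz): aux += matriz[row][col]; row += 1; col += 1';
-- fuel (= len(matriz)+1 at the call sites) bounds the remaining iterations, which Python bounds by the while condition
def pvWhileDiag (matriz : List (List String)) (dim : Int) : Nat → Int → Int → String → String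
  | 0, _, _, aux => aux
  | fuel + 1, row, col, aux =>
    if row < dim ∧ col < dim then
      pvWhileDiag matriz dim fuel (row + 1) (col + 1) (aux ++ pvCell matriz row col)
    else aux

def obtenerDiagonales (matriz : List (List String)) : List String :=
  let dimMatriz : Int := PySem.List.len matriz
  let diagonales₁ :=
    (PySem.List.pyRange (dimMatriz - 1) (0 - 1) (-1)).foldl
      (fun diagonales i => diagonales ++ [pvWhileDiag matriz dimMatriz (matriz.length + 1) i 0 ""]) []
  (PySem.List.pyRange 0 dimMatriz 1).foldl
    (fun diagonales i => diagonales ++ [pvWhileDiag matriz dimMatriz (matriz.length + 1) 0 (i + 1) ""]) diagonales₁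

-- ===== PORT B =====
def obtenerDiagonales_alt (matriz : List (List String)) : List String :=
  let n : Int := PySem.List.len matriz
  let diag : PySem.Dict Int String :=
    (PySem.List.pyRange 0 n 1).foldl (fun d r =>
      (PySem.List.pyRange 0 n 1).foldl (fun d c =>
        d.modify (r - c) "" (· ++ pvCell matriz r c)) d) PySem.Dict.empty
  (PySem.List.pyRange (n - 1) (-n - 1) (-1)).map (fun k => diag.getD k "")

-- ===== PRECONDITION & SPEC =====
-- Pre_ excludes exactly the ragged matrices on which the Python A raises IndexError
-- (a row shorter than len(matriz) is read past its end); A returns normally everywhere else.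
def Pre_obtenerDiagonales (matriz : List (List String)) : Prop :=
  ∀ fila ∈ matriz, matriz.length ≤ fila.length
instance (matriz : List (List String)) : Decidable (Pre_obtenerDiagonales matriz) := by
  unfold Pre_obtenerDiagonales; infer_instance

def pvWitness_obtenerDiagonales : List (List String) := [["a", "b"], ["c", "d"]]

def Spec_obtenerDiagonales (matriz : List (List String)) (out : List String) : Prop :=
  out = obtenerDiagonales_alt matriz
instance (matriz : List (List String)) (out : List String) : Decidable (Spec_obtenerDiagonales matriz out) := by
  unfold Spec_obtenerDiagonales; infer_instance

-- ===== CLAIM (what is proved, stated in full; the proofs are below) =====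
def Claim_equal_obtenerDiagonales : Prop := ∀ (matriz : List (List String)), Dom_obtenerDiagonales matriz → Pre_obtenerDiagonales matriz → Spec_obtenerDiagonales matriz (obtenerDiagonales matriz)

-- ===== LEMMAS AND PROOFS =====

-- concatenation of a list of strings (proof-side spec only)
def pvJoin (l : List String) : String := l.foldr (· ++ ·) ""

-- the diagonal with key k = r - c, read top to bottom: rows max 0 k ≤ r < min n (n+k)
def pvDiagStr (matriz : List (List String)) (n k : Int) : String :=
  pvJoin ((PySem.List.pyRange (max 0 k) (min n (n + k)) 1).map (fun r => pvCell matriz r (r - k)))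


lemma pvJoin_cons (s : String) (l : List String) : pvJoin (s :: l) = s ++ pvJoin l := rfl

lemma pvWhileDiag_acc (matriz : List (List String)) (dim : Int) :
    ∀ (fuel : Nat) (row col : Int) (aux : String),
      pvWhileDiag matriz dim fuel row col aux = aux ++ pvWhileDiag matriz dim fuel row col "" := by
  intro fuel
  induction fuel with
  | zero => intro row col aux; simp [pvWhileDiag]
  | succ fuel ih =>
    intro row col aux
    by_cases h : row < dim ∧ col < dim
    · simp only [pvWhileDiag, if_pos h]
      rw [ih _ _ (aux ++ pvCell matriz row col), ih _ _ ("" ++ pvCell matriz row col),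
        String.empty_append, String.append_assoc]
    · simp [pvWhileDiag, if_neg h]

lemma pvWhileDiag_eq (matriz : List (List String)) (n : Int) :
    ∀ (fuel : Nat) (row col : Int), 0 ≤ row → 0 ≤ col →
      min n (n + (row - col)) ≤ row + fuel →
      pvWhileDiag matriz n fuel row col "" =
        pvJoin ((PySem.List.pyRange row (min n (n + (row - col))) 1).map
          (fun r => pvCell matriz r (r - (row - col)))) := by
  intro fuel
  induction fuel with
  | zero =>
    intro row col _ _ hf
    rw [PySem.List.pyRange_one_eq_nil (by omega)]
    simp [pvWhileDiag, pvJoin]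
  | succ fuel ih =>
    intro row col hr hc hf
    by_cases h : row < n ∧ col < n
    · have hrow : row < min n (n + (row - col)) := by omega
      rw [PySem.List.pyRange_one_cons hrow]
      simp only [pvWhileDiag, if_pos h, List.map_cons, pvJoin_cons]
      rw [pvWhileDiag_acc, String.empty_append]
      have hk : (row + 1) - (col + 1) = row - col := by ring
      rw [ih (row + 1) (col + 1) (by omega) (by omega) (by rw [hk]; omega), hk]
      have hcol : row - (row - col) = col := by ring
      rw [hcol]
    · rw [PySem.List.pyRange_one_eq_nil (by omega)]
      simp [pvWhileDiag, if_neg h, pvJoin]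

lemma pvGetD_foldl_modify_strcat (l : List (Int × String)) :
    ∀ (d : PySem.Dict Int String) (k : Int),
      (l.foldl (fun d p => d.modify p.1 "" (· ++ p.2)) d).getD k "" =
        d.getD k "" ++ pvJoin ((l.filter (fun p => p.1 == k)).map (·.2)) := by
  induction l with
  | nil => intro d k; simp [pvJoin]
  | cons p l ih =>
    intro d k
    by_cases hp : p.1 = k
    · subst hp
      simp only [List.foldl_cons, List.filter_cons, beq_self_eq_true, if_true, List.map_cons,
        pvJoin_cons]
      rw [ih, PySem.Dict.getD_modify, if_pos rfl, String.append_assoc]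
    · have hb : (p.1 == k) = false := beq_eq_false_iff_ne.mpr hp
      simp only [List.foldl_cons, List.filter_cons, hb, Bool.false_eq_true, if_false]
      rw [ih, PySem.Dict.getD_modify, if_neg (fun h => hp h.symm)]

-- filtering an interval predicate out of an increasing range is a range
-- filtering an interval predicate out of an increasing range is a range
lemma pvFilter_pyRange_interval (a b lo hi : Int) :
    (PySem.List.pyRange a b 1).filter (fun r => decide (lo ≤ r ∧ r < hi)) =
      PySem.List.pyRange (max a lo) (min b hi) 1 := by
  have hperm : ((PySem.List.pyRange a b 1).filter (fun r => decide (lo ≤ r ∧ r < hi))).Perm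
      (PySem.List.pyRange (max a lo) (min b hi) 1) := by
    rw [List.perm_ext_iff_of_nodup
      ((PySem.List.nodup_pyRange_one a b).filter _) (PySem.List.nodup_pyRange_one _ _)]
    intro x
    simp only [List.mem_filter, PySem.List.mem_pyRange_one, decide_eq_true_eq]
    omega
  exact List.Perm.eq_of_pairwise' (r := (· ≤ ·))
    (((PySem.List.pairwise_lt_pyRange_one a b).imp le_of_lt).filter _)
    ((PySem.List.pairwise_lt_pyRange_one _ _).imp le_of_lt) hperm

lemma pvRowFilter (matriz : List (List String)) (n r k : Int) :
    ((((PySem.List.pyRange 0 n 1).map (fun c => (r - c, pvCell matriz r c))).filter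
        (fun p => p.1 == k)).map (·.2)) =
      if 0 ≤ r - k ∧ r - k < n then [pvCell matriz r (r - k)] else [] := by
  rw [List.filter_map]
  have hpred : ((PySem.List.pyRange 0 n 1).filter
      ((fun p : Int × String => p.1 == k) ∘ (fun c => (r - c, pvCell matriz r c)))) =
      (PySem.List.pyRange 0 n 1).filter (fun c => decide (r - k ≤ c ∧ c < r - k + 1)) := by
    apply List.filter_congr
    intro c _
    rw [Bool.eq_iff_iff]
    simp only [Function.comp, beq_iff_eq, decide_eq_true_eq]
    omega
  rw [hpred, pvFilter_pyRange_interval]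
  by_cases h : 0 ≤ r - k ∧ r - k < n
  · obtain ⟨h1, h2⟩ := h
    rw [if_pos ⟨h1, h2⟩]
    have e1 : max 0 (r - k) = r - k := by omega
    have e2 : min n (r - k + 1) = r - k + 1 := by omega
    rw [e1, e2, PySem.List.pyRange_one_singleton]
    simp
  · rw [if_neg h, PySem.List.pyRange_one_eq_nil (by omega), List.map_nil, List.map_nil]

lemma pvFlatMapFilterMap {α β γ : Type} (l : List α) (g : α → List β) (p : β → Bool) (f : β → γ) :
    ((l.flatMap g).filter p).map f = l.flatMap (fun a => ((g a).filter p).map f) := by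
  induction l with
  | nil => rfl
  | cons x l ih => simp only [List.flatMap_cons, List.filter_append, List.map_append, ih]

lemma pvFlatMap_ite {α β : Type} (l : List α) (p : α → Prop) [DecidablePred p] (f : α → β) :
    (l.flatMap fun x => if p x then [f x] else []) = (l.filter (fun x => decide (p x))).map f := by
  induction l with
  | nil => rfl
  | cons x l ih =>
    simp only [List.flatMap_cons, List.filter_cons]
    by_cases h : p x <;> simp [h, ih]

-- B's dict, looked up at any key, is that diagonal's string
lemma pvDict_getD (matriz : List (List String)) (n : Int) (k : Int) :
    (((PySem.List.pyRange 0 n 1).foldl (fun d r =>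
        (PySem.List.pyRange 0 n 1).foldl (fun d c =>
          d.modify (r - c) "" (· ++ pvCell matriz r c)) d) PySem.Dict.empty).getD k "") =
      pvDiagStr matriz n k := by
  have hflat : ((PySem.List.pyRange 0 n 1).foldl (fun d r =>
        (PySem.List.pyRange 0 n 1).foldl (fun d c =>
          d.modify (r - c) "" (· ++ pvCell matriz r c)) d) PySem.Dict.empty) =
      (((PySem.List.pyRange 0 n 1).flatMap
          (fun r => (PySem.List.pyRange 0 n 1).map (fun c => (r - c, pvCell matriz r c)))).foldl
        (fun d p => d.modify p.1 "" (· ++ p.2)) PySem.Dict.empty) := by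
    conv_rhs => rw [List.foldl_flatMap]
    simp only [List.foldl_map]
  rw [hflat, pvGetD_foldl_modify_strcat, PySem.Dict.getD_empty, String.empty_append,
    pvFlatMapFilterMap]
  rw [show (fun r => (((PySem.List.pyRange 0 n 1).map fun c => (r - c, pvCell matriz r c)).filter
        (fun p => p.1 == k)).map (fun x => x.2)) =
      (fun r => if 0 ≤ r - k ∧ r - k < n then [pvCell matriz r (r - k)] else []) from
    funext fun r => pvRowFilter matriz n r k]
  rw [pvFlatMap_ite]
  rw [show (fun r => decide (0 ≤ r - k ∧ r - k < n)) = (fun r => decide (k ≤ r ∧ r < n + k)) from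
    funext fun r => by rw [decide_eq_decide]; omega]
  rw [pvFilter_pyRange_interval 0 n k (n + k)]
  rfl

-- ===== VERDICT (by name: the statement is the Claim_ definition above) =====
theorem obtenerDiagonales_spec : Claim_equal_obtenerDiagonales := by
  intro matriz _ _
  show obtenerDiagonales matriz = obtenerDiagonales_alt matriz
  simp only [obtenerDiagonales, obtenerDiagonales_alt, PySem.List.len_eq,
    PySem.List.foldl_append_singleton_eq_map, List.nil_append]
  rw [show (fun k => (((PySem.List.pyRange 0 (matriz.length : Int) 1).foldl (fun d r =>
        (PySem.List.pyRange 0 (matriz.length : Int) 1).foldl (fun d c =>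
          d.modify (r - c) "" (· ++ pvCell matriz r c)) d) PySem.Dict.empty).getD k "")) =
      (fun k => pvDiagStr matriz (matriz.length : Int) k) from
    funext fun k => pvDict_getD matriz _ k]
  rw [PySem.List.pyRange_neg_one ((matriz.length : Int) - 1) (0 - 1),
    PySem.List.pyRange_neg_one ((matriz.length : Int) - 1) (-(matriz.length : Int) - 1),
    PySem.List.pyRange_one 0 (matriz.length : Int)]
  have c1 : (((matriz.length : Int) - 1) - (0 - 1)).toNat = matriz.length := by omega
  have c2 : (((matriz.length : Int) - 1) - (-(matriz.length : Int) - 1)).toNat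
      = matriz.length + matriz.length := by omega
  have c3 : ((matriz.length : Int) - 0).toNat = matriz.length := by omega
  rw [c1, c2, c3, List.range_add]
  simp only [List.map_append, List.map_map]
  congr 1
  · apply List.map_congr_left
    intro j hj
    have hj' : j < matriz.length := List.mem_range.mp hj
    simp only [Function.comp]
    rw [pvWhileDiag_eq matriz (matriz.length : Int) (matriz.length + 1)
      ((matriz.length : Int) - 1 - (j : Int)) 0 (by omega) le_rfl (by omega)]
    unfold pvDiagStr
    have e1 : max 0 ((matriz.length : Int) - 1 - (j : Int)) = (matriz.length : Int) - 1 - (j : Int) := by omega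
    rw [e1]
    simp only [sub_zero]
  · apply List.map_congr_left
    intro j hj
    have hj' : j < matriz.length := List.mem_range.mp hj
    simp only [Function.comp]
    rw [pvWhileDiag_eq matriz (matriz.length : Int) (matriz.length + 1)
      0 (0 + (j : Int) + 1) le_rfl (by omega) (by omega)]
    unfold pvDiagStr
    have e1 : (0 - (0 + (j : Int) + 1) : Int) = (matriz.length : Int) - 1 - ((matriz.length + j : Nat) : Int) := by
      push_cast; ring
    rw [e1]
    have e2 : max 0 ((matriz.length : Int) - 1 - ((matriz.length + j : Nat) : Int)) = 0 := by
      push_cast; omega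
    rw [e2]
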